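-- pv_equiv track=rewrite | github.com/cirosantilli/project-euler-solvers | solvers/465.py | polar_polygons_exact
-- ===== SOURCE A (Python) =====
-- def polar_polygons_exact(n: int) -> int:
--     """
--     Exact P(n) for small n (used only for the given sample asserts).
--     Uses the closed-form reduction, but evaluates with Python big integers.
--     """
--     if n <= 0:
--         return 0
--
--     # Simple totient sieve up to n (tiny for the sample values 1..3).
--     phi = list(range(n + 1))
--     for i in range(2, n + 1):
--         if phi[i] == i:
--             for j in range(i, n + 1, i):
--                 phi[j] -= phi[j] // i
--
--     B = 1
--     S1 = 0
--     S2 = 0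
--     for m in range(1, n + 1):
--         q = n // m
--         c = 4 * phi[m]
--         B *= (q + 1) ** c
--         S1 += c * q
--         S2 += c * q * q
--
--     return B * B - 2 * B * S1 + S2 - 1
-- ===== SOURCE B (Python) =====
-- def polar_polygons_exact(n: int) -> int:
--     """
--     Same exact P(n); totients computed per-m by direct coprime counting
--     (Euclid gcd), no sieve; B, S1, S2 accumulated in separate passes.
--     """
--     if n <= 0:
--         return 0
--
--     def gcd(a, b):
--         while b:
--             a, b = b, a % b
--         return a
--
--     # totient of each m = 1..n by counting k in [0, m) coprime to m
--     phis = [sum(1 for k in range(m) if gcd(k, m) == 1) for m in range(1, n + 1)]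
--
--     B = 1
--     for m, p in enumerate(phis, 1):
--         B *= (n // m + 1) ** (4 * p)
--     S1 = sum(4 * p * (n // m) for m, p in enumerate(phis, 1))
--     S2 = sum(4 * p * (n // m) ** 2 for m, p in enumerate(phis, 1))
--     return B * B - 2 * B * S1 + S2 - 1
-- ===== Notes on version B (the rewrite author's own statement) =====
-- stated objective: simpler
-- what changed: Replaces the in-place Eratosthenes-style totient sieve over a shared array by a per-m totient computed directly as a coprime count with a hand-written Euclid gcd, and splits the single combined (B, S1, S2) accumulation loop into three independent passes (one product, two sums).
import Mathlib
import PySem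

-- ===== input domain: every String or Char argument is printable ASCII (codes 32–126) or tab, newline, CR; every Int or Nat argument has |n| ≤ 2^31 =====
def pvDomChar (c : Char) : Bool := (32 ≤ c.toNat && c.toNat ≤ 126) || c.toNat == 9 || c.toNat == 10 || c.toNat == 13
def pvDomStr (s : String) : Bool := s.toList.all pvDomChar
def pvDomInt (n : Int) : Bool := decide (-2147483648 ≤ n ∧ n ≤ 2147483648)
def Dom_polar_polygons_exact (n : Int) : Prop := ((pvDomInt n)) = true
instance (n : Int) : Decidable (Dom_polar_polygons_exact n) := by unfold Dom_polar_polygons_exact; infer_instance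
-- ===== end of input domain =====

-- B replaces A's in-place totient sieve by per-m coprime counting (Euclid gcd) and
-- separate accumulation passes: plainer code, same exact value (objective: simpler).

-- ===== PORT A =====
-- literal port of A: totient sieve on a list, then one combined accumulation loop.
-- all list indices are in [0, N] so getD is exact for Python's phi[i]/phi[j];
-- the exponent c = 4*phi[m] is provably nonnegative, so `.toNat` is exact for `**`.
def polar_polygons_exact (n : Int) : Int :=
  if n ≤ 0 then 0
  else
    let N := n.toNat
    -- phi = list(range(n + 1))
    let phi0 : List Int := (List.range (N + 1)).map (fun (j : Nat) => (j : Int))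
    -- for i in range(2, n + 1): if phi[i] == i: for j in range(i, n + 1, i): phi[j] -= phi[j] // i
    let phi := (List.range' 2 (N - 1)).foldl
      (fun (φ : List Int) (i : Nat) =>
        if φ.getD i 0 == (i : Int) then
          -- range(i, n + 1, i) = [i, 2*i, ..., (N/i)*i]
          ((List.range (N / i)).map (fun t => (t + 1) * i)).foldl
            (fun (ψ : List Int) (j : Nat) => ψ.set j (ψ.getD j 0 - PySem.Int.floordiv (ψ.getD j 0) (i : Int))) φ
        else φ)
      phi0
    -- B, S1, S2 accumulated in one loop over m in range(1, n + 1)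
    let acc := (List.range' 1 N).foldl
      (fun (acc : Int × Int × Int) (m : Nat) =>
        let q := PySem.Int.floordiv n (m : Int)
        let c : Int := 4 * phi.getD m 0
        (acc.1 * (q + 1) ^ c.toNat, acc.2.1 + c * q, acc.2.2 + c * q * q))
      (1, 0, 0)
    acc.1 * acc.1 - 2 * acc.1 * acc.2.1 + acc.2.2 - 1

-- ===== PORT B =====
-- Source B's hand-written Euclid gcd
def pyGcd (a b : Nat) : Nat :=
  if h : b = 0 then a else pyGcd b (a % b)
termination_by b
decreasing_by exact Nat.mod_lt _ (Nat.pos_of_ne_zero h)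

-- sum(1 for k in range(m) if gcd(k, m) == 1)
def phiB (m : Nat) : Nat := ((List.range m).filter (fun k => pyGcd k m == 1)).length

def polar_polygons_exact_alt (n : Int) : Int :=
  if n ≤ 0 then 0
  else
    let N := n.toNat
    -- phis = [phi(m) for m in range(1, n + 1)]
    let phis := (List.range' 1 N).map phiB
    -- enumerate(phis, 1) pairs each totient with its m; three separate passes
    let B := (phis.zipIdx 1).foldl
      (fun b pm => b * (PySem.Int.floordiv n (pm.2 : Int) + 1) ^ (4 * pm.1)) 1
    let S1 := (phis.zipIdx 1).foldl
      (fun s pm => s + 4 * (pm.1 : Int) * PySem.Int.floordiv n (pm.2 : Int)) 0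
    let S2 := (phis.zipIdx 1).foldl
      (fun s pm => s + 4 * (pm.1 : Int) * (PySem.Int.floordiv n (pm.2 : Int)) ^ 2) 0
    B * B - 2 * B * S1 + S2 - 1

-- ===== PRECONDITION & SPEC =====
def Spec_polar_polygons_exact (n : Int) (out : Int) : Prop := out = polar_polygons_exact_alt n
instance (n : Int) (out : Int) : Decidable (Spec_polar_polygons_exact n out) := by unfold Spec_polar_polygons_exact; infer_instance

-- ===== CLAIM (what is proved, stated in full; the proofs are below) =====
def Claim_equal_polar_polygons_exact : Prop := ∀ (n : Int), Dom_polar_polygons_exact n → Spec_polar_polygons_exact n (polar_polygons_exact n)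

-- ===== LEMMAS AND PROOFS =====
def sievePrimes (k j : Nat) : Finset Nat := j.primeFactors.filter (fun p => p ≤ k)
def sieveVal (k j : Nat) : Nat :=
  (j / (sievePrimes k j).prod id) * (sievePrimes k j).prod (fun p => p - 1)

lemma sievePrimes_prod_dvd (k j : Nat) : (sievePrimes k j).prod id ∣ j :=
  dvd_trans (Finset.prod_dvd_prod_of_subset _ _ _ (Finset.filter_subset _ _))
    (Nat.prod_primeFactors_dvd j)

lemma sievePrimes_one (j : Nat) : sievePrimes 1 j = ∅ := by
  ext p
  simp only [sievePrimes, Finset.mem_filter, Nat.mem_primeFactors, Finset.notMem_empty, iff_false, not_and, and_imp]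
  intro hp _ _
  have := hp.two_le
  omega

lemma sieveVal_one (j : Nat) : sieveVal 1 j = j := by
  simp [sieveVal, sievePrimes_one]

lemma prod_pos (k j : Nat) : 0 < (sievePrimes k j).prod id := by
  apply Finset.prod_pos
  intro p hp
  simp only [sievePrimes, Finset.mem_filter, Nat.mem_primeFactors] at hp
  exact hp.1.1.pos

lemma sievePrimes_of_prime (k : Nat) (hp : (k+1).Prime) : sievePrimes k (k+1) = ∅ := by
  ext p
  simp only [sievePrimes, Finset.mem_filter, Nat.mem_primeFactors, Finset.notMem_empty, iff_false, not_and, and_imp]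
  intro pp pd _ hle
  rcases (Nat.Prime.eq_one_or_self_of_dvd hp p pd) with h | h
  · exact pp.one_lt.ne' h
  · omega

lemma sieveVal_self_iff (k : Nat) (hk : 1 ≤ k) : sieveVal k (k + 1) = k + 1 ↔ (k + 1).Prime := by
  constructor
  · intro h
    by_contra hnp
    -- k+1 composite: it has a prime factor ≤ k, so sieveVal k (k+1) < k+1
    have h2 : 2 ≤ k + 1 := by omega
    have hmf := Nat.minFac_prime (n := k+1) (by omega)
    have hdvd := Nat.minFac_dvd (k+1)
    have hne : (k+1).minFac ≠ k+1 := fun he => hnp (he ▸ hmf)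
    have hle : (k+1).minFac ≤ k := by
      have := Nat.le_of_dvd (by omega) hdvd
      omega
    have hmem : (k+1).minFac ∈ sievePrimes k (k+1) := by
      simp only [sievePrimes, Finset.mem_filter, Nat.mem_primeFactors]
      exact ⟨⟨hmf, hdvd, by omega⟩, hle⟩
    -- strict inequality
    set R := (sievePrimes k (k+1)).prod id with hR
    have hRdvd : R ∣ k+1 := sievePrimes_prod_dvd k (k+1)
    have hQR : (sievePrimes k (k+1)).prod (fun p => p - 1) < R := by
      apply Finset.prod_lt_prod_of_nonempty
      · intro p hpm
        simp only [sievePrimes, Finset.mem_filter, Nat.mem_primeFactors] at hpm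
        have := hpm.1.1.two_le; omega
      · intro p hpm
        simp only [sievePrimes, Finset.mem_filter, Nat.mem_primeFactors] at hpm
        have := hpm.1.1.two_le; simp only [id]; omega
      · exact ⟨_, hmem⟩
    have hapos : 0 < (k+1) / R := Nat.div_pos (Nat.le_of_dvd (by omega) hRdvd) (prod_pos _ _)
    have : sieveVal k (k+1) < ((k+1)/R) * R := by
      unfold sieveVal
      exact Nat.mul_lt_mul_of_le_of_lt (le_refl _) hQR hapos
    rw [Nat.div_mul_cancel hRdvd] at this
    omega
  · intro hp
    simp [sieveVal, sievePrimes_of_prime k hp]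

lemma sievePrimes_stable (k j : Nat) (h : ¬ ((k + 1).Prime ∧ (k + 1) ∣ j)) :
    sievePrimes (k + 1) j = sievePrimes k j := by
  ext p
  simp only [sievePrimes, Finset.mem_filter, Nat.mem_primeFactors]
  constructor
  · rintro ⟨⟨pp, pd, hj⟩, hle⟩
    refine ⟨⟨pp, pd, hj⟩, ?_⟩
    rcases Nat.lt_or_ge p (k+1) with hlt | hge
    · omega
    · exfalso; exact h ⟨(by omega : p = k+1) ▸ pp, (by omega : p = k+1) ▸ pd⟩
  · rintro ⟨hm, hle⟩; exact ⟨hm, by omega⟩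

lemma sieveVal_stable (k j : Nat) (h : ¬ ((k + 1).Prime ∧ (k + 1) ∣ j)) :
    sieveVal (k + 1) j = sieveVal k j := by
  simp [sieveVal, sievePrimes_stable k j h]

lemma notMem_sievePrimes (k j : Nat) : (k + 1) ∉ sievePrimes k j := by
  simp only [sievePrimes, Finset.mem_filter, Nat.mem_primeFactors]
  rintro ⟨-, hle⟩; omega

lemma coprime_prod (k j : Nat) (hp : (k + 1).Prime) :
    Nat.Coprime (k + 1) ((sievePrimes k j).prod id) := by
  apply Nat.Coprime.prod_right
  intro p hpm
  simp only [sievePrimes, Finset.mem_filter, Nat.mem_primeFactors] at hpm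
  exact (Nat.coprime_primes hp hpm.1.1).mpr (by have := hpm.2; omega)

lemma dvd_div_prod (k j : Nat) (hp : (k + 1).Prime) (hd : (k + 1) ∣ j) :
    (k + 1) ∣ j / (sievePrimes k j).prod id := by
  have hR : (sievePrimes k j).prod id ∣ j := sievePrimes_prod_dvd k j
  have : (k + 1) ∣ (j / (sievePrimes k j).prod id) * (sievePrimes k j).prod id := by
    rwa [Nat.div_mul_cancel hR]
  exact (Nat.Coprime.dvd_of_dvd_mul_right (coprime_prod k j hp)) this

lemma sievePrimes_insert (k j : Nat) (hp : (k + 1).Prime) (hd : (k + 1) ∣ j) (hj : j ≠ 0) :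
    sievePrimes (k + 1) j = insert (k + 1) (sievePrimes k j) := by
  ext p
  simp only [sievePrimes, Finset.mem_filter, Nat.mem_primeFactors, Finset.mem_insert]
  constructor
  · rintro ⟨⟨pp, pd, hjj⟩, hle⟩
    rcases Nat.lt_or_ge p (k+1) with hlt | hge
    · exact Or.inr ⟨⟨pp, pd, hjj⟩, by omega⟩
    · exact Or.inl (by omega)
  · rintro (rfl | ⟨hm, hle⟩)
    · exact ⟨⟨hp, hd, hj⟩, le_refl _⟩
    · exact ⟨hm, by omega⟩

lemma sieveVal_step (k j : Nat) (hp : (k + 1).Prime) (hd : (k + 1) ∣ j) :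
    sieveVal k j - sieveVal k j / (k + 1) = sieveVal (k + 1) j := by
  rcases Nat.eq_zero_or_pos j with rfl | hj
  · simp [sieveVal, Nat.zero_div]
  have hins := sievePrimes_insert k j hp hd (by omega)
  have hni := notMem_sievePrimes k j
  set R := (sievePrimes k j).prod id with hR
  set Q := (sievePrimes k j).prod (fun p => p - 1) with hQ
  have hb : (k + 1) ∣ j / R := dvd_div_prod k j hp hd
  obtain ⟨b, hbb⟩ := hb
  have hRpos : 0 < R := prod_pos k j
  have hL : sieveVal k j = (k+1) * b * Q := by rw [sieveVal, ← hR, ← hQ, hbb]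
  have hdivL : sieveVal k j / (k + 1) = b * Q := by
    rw [hL, Nat.mul_assoc, Nat.mul_div_cancel_left _ (by omega : 0 < k + 1)]
  have h1 : j / ((k + 1) * R) = b := by
    rw [Nat.mul_comm, ← Nat.div_div_eq_div_mul, hbb, Nat.mul_div_cancel_left _ (by omega : 0 < k + 1)]
  have hRHS : sieveVal (k + 1) j = b * (k * Q) := by
    rw [sieveVal, hins, Finset.prod_insert hni, Finset.prod_insert hni, ← hR, ← hQ]
    show j / ((k + 1) * R) * ((k + 1 - 1) * Q) = b * (k * Q)
    rw [h1]
    simp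
  rw [hdivL, hL, hRHS]
  have hsplit : (k + 1) * b * Q = k * (b * Q) + b * Q := by ring
  rw [hsplit, Nat.add_sub_cancel]
  ring

lemma sieveVal_totient (N m : Nat) (h1 : 1 ≤ m) (h2 : m ≤ N) :
    sieveVal N m = Nat.totient m := by
  have hsp : sievePrimes N m = m.primeFactors := by
    ext p
    simp only [sievePrimes, Finset.mem_filter, Nat.mem_primeFactors]
    constructor
    · rintro ⟨hm, -⟩; exact hm
    · rintro ⟨pp, pd, hm⟩
      exact ⟨⟨pp, pd, hm⟩, le_trans (Nat.le_of_dvd (by omega) pd) h2⟩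
  have key := Nat.totient_mul_prod_primeFactors m
  have hR : (m.primeFactors.prod id) ∣ m := Nat.prod_primeFactors_dvd m
  have hRpos : 0 < m.primeFactors.prod id := by
    apply Finset.prod_pos; intro p hp
    exact (Nat.prime_of_mem_primeFactors hp).pos
  rw [sieveVal, hsp]
  apply Nat.eq_of_mul_eq_mul_right hRpos
  calc m / m.primeFactors.prod id * (∏ p ∈ m.primeFactors, (p - 1)) * m.primeFactors.prod id
      = (m / m.primeFactors.prod id * m.primeFactors.prod id) * ∏ p ∈ m.primeFactors, (p - 1) := by ring
    _ = m * ∏ p ∈ m.primeFactors, (p - 1) := by rw [Nat.div_mul_cancel hR]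
    _ = Nat.totient m * m.primeFactors.prod id := by
        rw [← key]; simp

lemma getD_map_range {α : Type} (N : Nat) (f : Nat → α) (d : α) (j : Nat) (hj : j < N + 1) :
    ((List.range (N + 1)).map f).getD j d = f j := by
  rw [List.getD_eq_getElem?_getD, List.getElem?_map, List.getElem?_range hj]
  rfl

lemma set_map_range {α : Type} (N : Nat) (f : Nat → α) (j0 : Nat) (v : α) (hj : j0 < N + 1) :
    ((List.range (N + 1)).map f).set j0 v
      = (List.range (N + 1)).map (fun j => if j = j0 then v else f j) := by
  apply List.ext_getElem
  · simp
  intro i h1 h2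
  simp only [List.getElem_set, List.getElem_map, List.getElem_range]
  simp only [List.length_set, List.length_map, List.length_range] at h1
  by_cases hij : i = j0
  · subst hij; simp
  · simp [hij, Ne.symm hij]

lemma fold_upd (N : Nat) (u : Int → Int) (l : List Nat) (f : Nat → Int)
    (hm : ∀ j ∈ l, j < N + 1) (hd : l.Nodup) :
    l.foldl (fun ψ j => ψ.set j (u (ψ.getD j 0))) ((List.range (N + 1)).map f)
      = (List.range (N + 1)).map (fun j => if j ∈ l then u (f j) else f j) := by
  induction l generalizing f with
  | nil => simp
  | cons j0 t ih =>
    have hj0 : j0 < N + 1 := hm j0 (by simp)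
    have hnd := (List.nodup_cons.mp hd)
    simp only [List.foldl_cons]
    rw [getD_map_range N f 0 j0 hj0, set_map_range N f j0 (u (f j0)) hj0]
    rw [ih _ (fun j hj => hm j (by simp [hj])) hnd.2]
    apply List.map_congr_left
    intro j hjr
    by_cases hj : j = j0
    · subst hj
      simp [hnd.1]
    · simp [hj]

lemma multiples_mem (N i j : Nat) (hi : 1 ≤ i) :
    (j ∈ (List.range (N / i)).map (fun t => (t + 1) * i)) ↔ (i ∣ j ∧ 1 ≤ j ∧ j ≤ N) := by
  simp only [List.mem_map, List.mem_range]
  constructor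
  · rintro ⟨t, ht, rfl⟩
    refine ⟨Dvd.intro_left _ rfl, Nat.mul_pos (by omega) (by omega), ?_⟩
    calc (t + 1) * i ≤ (N / i) * i := Nat.mul_le_mul_right i (by omega)
      _ ≤ N := Nat.div_mul_le_self N i
  · rintro ⟨⟨s, rfl⟩, h1, h2⟩
    have hs : 1 ≤ s := by
      rcases Nat.eq_zero_or_pos s with rfl | h
      · omega
      · exact h
    have hle : s ≤ N / i := Nat.le_div_iff_mul_le (by omega) |>.mpr (by rw [Nat.mul_comm]; omega)
    refine ⟨s - 1, by omega, ?_⟩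
    have h3 : s - 1 + 1 = s := by omega
    rw [h3, Nat.mul_comm]

lemma multiples_nodup (N i : Nat) (hi : 1 ≤ i) :
    ((List.range (N / i)).map (fun t => (t + 1) * i)).Nodup := by
  apply List.Nodup.map
  · intro a b h
    simp only at h
    have := Nat.eq_of_mul_eq_mul_right (by omega : 0 < i) h
    omega
  · exact List.nodup_range

lemma int_update_eq (k j : Nat) (hp : (k + 1).Prime) (hd : (k + 1) ∣ j) :
    ((sieveVal k j : Nat) : Int) - PySem.Int.floordiv ((sieveVal k j : Nat) : Int) ((k + 1 : Nat) : Int)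
      = ((sieveVal (k + 1) j : Nat) : Int) := by
  rw [PySem.Int.floordiv_natCast]
  have hle : sieveVal k j / (k + 1) ≤ sieveVal k j := Nat.div_le_self _ _
  rw [← Nat.cast_sub hle, sieveVal_step k j hp hd]

lemma fold_upd_fd (N : Nat) (i : Int) (l : List Nat) (f : Nat → Int)
    (hm : ∀ j ∈ l, j < N + 1) (hd : l.Nodup) :
    l.foldl (fun (ψ : List Int) (j : Nat) => ψ.set j (ψ.getD j 0 - PySem.Int.floordiv (ψ.getD j 0) i))
        ((List.range (N + 1)).map f)
      = (List.range (N + 1)).map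
          (fun j => if j ∈ l then f j - PySem.Int.floordiv (f j) i else f j) :=
  fold_upd N (fun x => x - PySem.Int.floordiv x i) l f hm hd

lemma sieveVal_zero (k : Nat) : sieveVal k 0 = 0 := by
  simp [sieveVal]

lemma sieve_invariant (N m : Nat) (hm : m ≤ N - 1) (hN : 1 ≤ N) :
    (List.range' 2 m).foldl
      (fun (φ : List Int) (i : Nat) =>
        if φ.getD i 0 == (i : Int) then
          ((List.range (N / i)).map (fun t => (t + 1) * i)).foldl
            (fun (ψ : List Int) (j : Nat) => ψ.set j (ψ.getD j 0 - PySem.Int.floordiv (ψ.getD j 0) (i : Int))) φ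
        else φ)
      ((List.range (N + 1)).map (fun (j : Nat) => (j : Int)))
    = (List.range (N + 1)).map (fun j => ((sieveVal (m + 1) j : Nat) : Int)) := by
  induction m with
  | zero =>
    simp [sieveVal_one]
  | succ m ih =>
    rw [List.range'_concat, List.foldl_append, ih (by omega)]
    simp only [List.foldl_cons, List.foldl_nil, Nat.one_mul]
    set i := 2 + m with hi
    have hiN : i < N + 1 := by omega
    have hgd := getD_map_range N (fun j => ((sieveVal (m + 1) j : Nat) : Int)) 0 i hiN
    rw [hgd]
    have hik : i = (m + 1) + 1 := by omega
    by_cases hpr : ((m + 1) + 1).Prime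
    · have hcond : sieveVal (m + 1) i = i := by
        rw [hik]; exact (sieveVal_self_iff (m + 1) (by omega)).mpr hpr
      rw [if_pos (by simp only [hcond, beq_self_eq_true])]
      rw [fold_upd_fd N _ _ _
        (fun j hj => by
          have := (multiples_mem N i j (by omega)).mp hj
          omega)
        (multiples_nodup N i (by omega))]
      apply List.map_congr_left
      intro j hjr
      by_cases hmem : j ∈ (List.range (N / i)).map (fun t => (t + 1) * i)
      · rw [if_pos hmem]
        have hdvd : i ∣ j := ((multiples_mem N i j (by omega)).mp hmem).1
        rw [hik] at hdvd ⊢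
        exact int_update_eq (m + 1) j hpr hdvd
      · rw [if_neg hmem]
        rcases Nat.eq_zero_or_pos j with rfl | hjpos
        · norm_num [sieveVal_zero]
        · have : ¬ (((m + 1) + 1).Prime ∧ ((m + 1) + 1) ∣ j) := by
            rintro ⟨-, hdvd⟩
            apply hmem
            rw [multiples_mem N i j (by omega), hik]
            refine ⟨hdvd, by omega, ?_⟩
            have := List.mem_range.mp hjr
            omega
          rw [sieveVal_stable (m + 1) j this]
    · have hcond : sieveVal (m + 1) i ≠ i := by
        rw [hik]; intro h; exact hpr ((sieveVal_self_iff (m + 1) (by omega)).mp h)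
      rw [if_neg (by simp [hcond])]
      apply List.map_congr_left
      intro j hjr
      have : ¬ (((m + 1) + 1).Prime ∧ ((m + 1) + 1) ∣ j) := fun h => hpr h.1
      rw [sieveVal_stable (m + 1) j this]

lemma pyGcd_eq_gcd (a b : Nat) : pyGcd a b = Nat.gcd a b := by
  induction b using Nat.strong_induction_on generalizing a with
  | _ b ih =>
    rw [pyGcd]
    by_cases hb : b = 0
    · simp [hb]
    · rw [dif_neg hb, ih (a % b) (Nat.mod_lt _ (Nat.pos_of_ne_zero hb))]
      rw [Nat.gcd_comm b (a % b), ← Nat.gcd_rec b a, Nat.gcd_comm]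

lemma phiB_totient (m : Nat) : phiB m = Nat.totient m := by
  have hp : (fun k => pyGcd k m == 1) = (fun k => decide (m.Coprime k)) := by
    funext k
    rw [pyGcd_eq_gcd, Nat.gcd_comm]
    by_cases h : Nat.gcd m k = 1
    · simp [Nat.Coprime, h]
    · simp [Nat.Coprime, h]
  rw [Nat.totient, phiB, hp]
  simp [Finset.range, Finset.filter, Finset.card, Multiset.range, Multiset.filter_coe]

lemma fold_split (l : List Nat) (f g h : Int → Nat → Int) (b0 s0 t0 : Int) :
    l.foldl (fun (acc : Int × Int × Int) m => (f acc.1 m, g acc.2.1 m, h acc.2.2 m)) (b0, s0, t0)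
      = (l.foldl f b0, l.foldl g s0, l.foldl h t0) := by
  induction l generalizing b0 s0 t0 with
  | nil => rfl
  | cons x t ih => simp only [List.foldl_cons]; exact ih _ _ _

lemma zipIdx_range' (s N : Nat) :
    (List.range' s N).zipIdx s = (List.range' s N).map (fun m => (m, m)) := by
  induction N generalizing s with
  | zero => rfl
  | succ n ih =>
    rw [List.range'_succ]
    simp only [List.zipIdx_cons, List.map_cons]
    exact congrArg _ (ih (s + 1))

lemma zipIdx_map {α β : Type} (l : List α) (f : α → β) (s : Nat) :
    (l.map f).zipIdx s = (l.zipIdx s).map (fun p => (f p.1, p.2)) := by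
  induction l generalizing s with
  | nil => rfl
  | cons x t ih =>
    simp only [List.map_cons, List.zipIdx_cons, ih (s + 1)]

-- ===== VERDICT (by name: the statement is the Claim_ definition above) =====
theorem polar_polygons_exact_spec : Claim_equal_polar_polygons_exact := by
  intro n _
  unfold Spec_polar_polygons_exact
  by_cases hn : n ≤ 0
  · simp [polar_polygons_exact, polar_polygons_exact_alt, hn]
  · have hN : 1 ≤ n.toNat := by omega
    simp only [polar_polygons_exact, polar_polygons_exact_alt, if_neg hn]
    rw [sieve_invariant n.toNat (n.toNat - 1) (by omega) hN]
    rw [(by omega : n.toNat - 1 + 1 = n.toNat)]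
    rw [zipIdx_map, zipIdx_range', List.map_map]
    rw [List.foldl_map, List.foldl_map, List.foldl_map]
    have hgd : ∀ m ∈ List.range' 1 n.toNat,
        (List.map (fun j => ((sieveVal n.toNat j : Nat) : Int)) (List.range (n.toNat + 1))).getD m 0
          = ((Nat.totient m : Nat) : Int) := by
      intro m hm
      have hmr := List.mem_range'_1.mp hm
      rw [getD_map_range n.toNat _ 0 m (by omega)]
      rw [sieveVal_totient n.toNat m (by omega) (by omega)]
    have hA : List.foldl
        (fun (acc : Int × Int × Int) (m : Nat) =>
          (acc.1 * (PySem.Int.floordiv n (m : Int) + 1) ^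
              (4 * (List.map (fun j => ((sieveVal n.toNat j : Nat) : Int)) (List.range (n.toNat + 1))).getD m 0).toNat,
            acc.2.1 + 4 * (List.map (fun j => ((sieveVal n.toNat j : Nat) : Int)) (List.range (n.toNat + 1))).getD m 0 *
              PySem.Int.floordiv n (m : Int),
            acc.2.2 + 4 * (List.map (fun j => ((sieveVal n.toNat j : Nat) : Int)) (List.range (n.toNat + 1))).getD m 0 *
              PySem.Int.floordiv n (m : Int) * PySem.Int.floordiv n (m : Int)))
        (1, 0, 0) (List.range' 1 n.toNat)
      = List.foldl
        (fun (acc : Int × Int × Int) (m : Nat) =>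
          (acc.1 * (PySem.Int.floordiv n (m : Int) + 1) ^ (4 * Nat.totient m),
            acc.2.1 + 4 * ((Nat.totient m : Nat) : Int) * PySem.Int.floordiv n (m : Int),
            acc.2.2 + 4 * ((Nat.totient m : Nat) : Int) * PySem.Int.floordiv n (m : Int) * PySem.Int.floordiv n (m : Int)))
        (1, 0, 0) (List.range' 1 n.toNat) := by
      apply PySem.List.foldl_congr_mem
      intro acc m hm
      rw [hgd m hm]
      have he : (4 * ((Nat.totient m : Nat) : Int)).toNat = 4 * Nat.totient m := by omega
      rw [he]
    rw [hA, fold_split (List.range' 1 n.toNat)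
      (fun b m => b * (PySem.Int.floordiv n (m : Int) + 1) ^ (4 * Nat.totient m))
      (fun s m => s + 4 * ((Nat.totient m : Nat) : Int) * PySem.Int.floordiv n (m : Int))
      (fun t m => t + 4 * ((Nat.totient m : Nat) : Int) * PySem.Int.floordiv n (m : Int) * PySem.Int.floordiv n (m : Int))
      1 0 0]
    simp only [Function.comp, phiB_totient]
    have hS2 : List.foldl
        (fun (s : Int) (m : Nat) => s + 4 * ((Nat.totient m : Nat) : Int) * (PySem.Int.floordiv n (m : Int)) ^ 2)
        0 (List.range' 1 n.toNat)
      = List.foldl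
        (fun (t : Int) (m : Nat) => t + 4 * ((Nat.totient m : Nat) : Int) * PySem.Int.floordiv n (m : Int) * PySem.Int.floordiv n (m : Int))
        0 (List.range' 1 n.toNat) :=
      PySem.List.foldl_congr_mem _ _ _ _ (fun acc m _ => by ring)
    rw [hS2]
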